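-- pv_equiv track=rewrite | github.com/enoriega/adventofcode2024 | day24/part2.py | compare_bits
-- ===== SOURCE A (Python) =====
-- def compare_bits(target, number):
-- 	""" Returns: num of matching bits, bit ix to change, bit target val"""
-- 	ix = 0
-- 	start = None
-- 	end = None
--
-- 	tn = 0
-- 	nn = 0
--
-- 	while target > 0:
-- 		t = target % 2
-- 		n = number % 2
--
-- 		if start is None and t != n:
-- 			start = ix
-- 		elif start is not None and end is None and  t == n:
-- 			end = ix-1
--
-- 		if start is not None and end is None:
-- 			t <<= (ix-start)
-- 			n <<= (ix-start)
-- 			tn += t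
-- 			nn += n
--
-- 		target >>= 1
-- 		number >>= 1
--
-- 		ix += 1
--
-- 	if start is not None:
-- 		num_equal = start
-- 		diff = tn - nn
-- 		if diff == 1:
-- 			bit_ix = end
-- 			target_val = True
-- 		else:
-- 			bit_ix = end
-- 			target_val = False
--
-- 	else:
-- 		num_equal = ix
-- 		bit_ix = None
-- 		target_val = None
--
-- 	return num_equal, bit_ix, target_val
-- ===== SOURCE B (Python) =====
-- def compare_bits(target, number):
--     """ Returns: num of matching bits, bit ix to change, bit target val"""
--     if target <= 0:
--         return 0, None, None
--     if target % 2 == number % 2: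
--         n_eq, bit_ix, val = compare_bits(target >> 1, number >> 1)
--         return n_eq + 1, (None if bit_ix is None else bit_ix + 1), val
--     end, diff = _diff_run(target, number)
--     return 0, end, diff == 1
--
-- def _diff_run(target, number):
--     """target > 0 and low bits differ: scan the differing run, returning its
--     last index (None if it reaches target's top bit) and its signed value."""
--     d0 = target % 2 - number % 2
--     t2, n2 = target >> 1, number >> 1
--     if t2 <= 0:
--         return None, d0
--     if t2 % 2 == n2 % 2:
--         return 0, d0
--     e, d = _diff_run(t2, n2)
--     return (None if e is None else e + 1), d0 + 2 * d
-- ===== Notes on version B (the rewrite author's own statement) =====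
-- stated objective: simpler
-- what changed: Replaces A's single while-loop that threads five pieces of mutable state (start/end None-sentinels, absolute index, shift-accumulated tn/nn) with structural recursion on the bits: equal low bits recurse and bump the result by one, and a small helper scans the first differing run returning its relative end and signed value directly.
import Mathlib
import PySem

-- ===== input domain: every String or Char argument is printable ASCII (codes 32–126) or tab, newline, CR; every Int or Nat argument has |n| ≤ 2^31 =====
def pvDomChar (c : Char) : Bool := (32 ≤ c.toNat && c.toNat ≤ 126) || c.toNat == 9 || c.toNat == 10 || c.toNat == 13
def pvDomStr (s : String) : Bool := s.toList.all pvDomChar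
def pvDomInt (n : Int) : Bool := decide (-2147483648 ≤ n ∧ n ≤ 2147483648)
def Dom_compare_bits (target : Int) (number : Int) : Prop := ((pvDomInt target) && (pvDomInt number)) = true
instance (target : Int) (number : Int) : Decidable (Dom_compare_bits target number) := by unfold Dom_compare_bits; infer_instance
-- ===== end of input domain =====

-- B replaces A's single while-loop with five pieces of mutable state (start/end sentinels,
-- index bookkeeping, shifted accumulators) by structural recursion on the bits with
-- relative indices; objective: simpler.

-- ===== PORT A =====
-- the while-loop as a recursive helper over the loop state (ix, start, end, tn, nn);
-- `ix - s` is nonnegative whenever the shift is executed (start is set to a previous ix),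
-- so `.toNat` is exact there.
def pvLoopA (target number : Int) (ix : Int) (start fin : Option Int) (tn nn : Int) :
    Int × Option Int × Option Int × Int × Int :=
  if _h : 0 < target then
    let t := PySem.Int.mod target 2
    let n := PySem.Int.mod number 2
    let start' : Option Int := if start = none ∧ t ≠ n then some ix else start
    let fin' : Option Int := if start ≠ none ∧ fin = none ∧ t = n then some (ix - 1) else fin
    match start', fin' with
    | some s, none =>
        pvLoopA (target >>> (1:Nat)) (number >>> (1:Nat)) (ix + 1) (some s) none
          (tn + (t <<< (ix - s).toNat)) (nn + (n <<< (ix - s).toNat))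
    | s', f' =>
        pvLoopA (target >>> (1:Nat)) (number >>> (1:Nat)) (ix + 1) s' f' tn nn
  else (ix, start, fin, tn, nn)
termination_by target.toNat
decreasing_by all_goals (simp [Int.shiftRight_eq_div_pow]; omega)

def compare_bits (target : Int) (number : Int) : Int × Option Int × Option Bool :=
  let r := pvLoopA target number 0 none none 0 0
  match r.2.1 with
  | some s => (s, r.2.2.1, some (decide (r.2.2.2.1 - r.2.2.2.2 = 1)))
  | none => (r.1, none, none)

-- ===== PORT B =====
-- `_diff_run`: target > 0 and the low bits differ; returns the differing run's last
-- index relative to the current position (none if it reaches target's top bit) and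
-- its signed value.
def pvDiffRun (target number : Int) : Option Int × Int :=
  let d0 := PySem.Int.mod target 2 - PySem.Int.mod number 2
  let t2 := target >>> (1:Nat)
  let n2 := number >>> (1:Nat)
  if h : t2 ≤ 0 then (none, d0)
  else if PySem.Int.mod t2 2 = PySem.Int.mod n2 2 then (some 0, d0)
  else
    let ed := pvDiffRun t2 n2
    ((match ed.1 with | none => none | some e => some (e + 1)), d0 + 2 * ed.2)
termination_by target.toNat
decreasing_by
  replace h : ¬ target >>> (1:Nat) ≤ 0 := h
  show (target >>> (1:Nat)).toNat < target.toNat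
  simp only [Int.shiftRight_eq_div_pow, pow_one] at *
  omega

def compare_bits_alt (target : Int) (number : Int) : Int × Option Int × Option Bool :=
  if _h : target ≤ 0 then (0, none, none)
  else if PySem.Int.mod target 2 = PySem.Int.mod number 2 then
    let r := compare_bits_alt (target >>> (1:Nat)) (number >>> (1:Nat))
    (r.1 + 1, (match r.2.1 with | none => none | some b => some (b + 1)), r.2.2)
  else
    let ed := pvDiffRun target number
    (0, ed.1, some (decide (ed.2 = 1)))
termination_by target.toNat
decreasing_by simp only [Int.shiftRight_eq_div_pow, pow_one] at *; omega

-- ===== PRECONDITION & SPEC =====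
def Spec_compare_bits (target : Int) (number : Int) (out : Int × Option Int × Option Bool) : Prop := out = compare_bits_alt target number
instance (target : Int) (number : Int) (out : Int × Option Int × Option Bool) : Decidable (Spec_compare_bits target number out) := by unfold Spec_compare_bits; infer_instance

-- ===== CLAIM (what is proved, stated in full; the proofs are below) =====
def Claim_equal_compare_bits : Prop := ∀ (target : Int) (number : Int), Dom_compare_bits target number → Spec_compare_bits target number (compare_bits target number)

-- ===== LEMMAS AND PROOFS =====

-- proof-side reference for the loop's state after `start` was set and `end` is still none:
-- first component = the index (relative to the current ix) one past the differing run's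
-- last bit minus one (none if the run reaches target's top), second = the run's value.
def pvPhase2 (t n : Int) : Option Int × Int :=
  if h : t ≤ 0 then (none, 0)
  else if PySem.Int.mod t 2 = PySem.Int.mod n 2 then (some (-1), 0)
  else
    let ed := pvPhase2 (t >>> (1:Nat)) (n >>> (1:Nat))
    (ed.1.map (· + 1), (PySem.Int.mod t 2 - PySem.Int.mod n 2) + 2 * ed.2)
termination_by t.toNat
decreasing_by simp only [Int.shiftRight_eq_div_pow, pow_one] at *; omega

-- phase 3: once start and end are both set, the loop only consumes bits.
lemma pvLoopA_phase3 (k : Nat) : ∀ (t n ix : Int) (s e tn nn : Int), t.toNat ≤ k →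
    (pvLoopA t n ix (some s) (some e) tn nn).2 = (some s, some e, tn, nn) := by
  induction k with
  | zero =>
    intro t n ix s e tn nn hk
    rw [pvLoopA]
    have ht : ¬ 0 < t := by omega
    simp [ht]
  | succ k ih =>
    intro t n ix s e tn nn hk
    rw [pvLoopA]
    by_cases ht : 0 < t
    · simp only [ht, reduceDIte]
      simp only [reduceCtorEq, false_and, if_false, and_false, ne_eq, not_false_iff]
      exact ih _ _ _ _ _ _ _ (by simp [Int.shiftRight_eq_div_pow]; omega)
    · simp [ht]

-- phase 2: start set, end not yet; the remainder is described by pvPhase2.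
lemma pvLoopA_phase2 (k : Nat) : ∀ (t n ix s tn nn : Int), t.toNat ≤ k → s ≤ ix →
    (pvLoopA t n ix (some s) none tn nn).2.1 = some s ∧
    (pvLoopA t n ix (some s) none tn nn).2.2.1 = (pvPhase2 t n).1.map (· + ix) ∧
    (pvLoopA t n ix (some s) none tn nn).2.2.2.1 - (pvLoopA t n ix (some s) none tn nn).2.2.2.2
      = tn - nn + 2 ^ (ix - s).toNat * (pvPhase2 t n).2 := by
  induction k with
  | zero =>
    intro t n ix s tn nn hk hs
    have ht : ¬ 0 < t := by omega
    rw [pvLoopA, pvPhase2]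
    simp [ht, show t ≤ 0 by omega]
  | succ k ih =>
    intro t n ix s tn nn hk hs
    by_cases ht : 0 < t
    · rw [pvLoopA, pvPhase2]
      have ht' : ¬ t ≤ 0 := by omega
      by_cases hb : PySem.Int.mod t 2 = PySem.Int.mod n 2
      · simp only [ht, reduceDIte, ht', hb, reduceCtorEq, false_and, if_false, if_true,
          ne_eq, not_false_iff, true_and]
        rw [pvLoopA_phase3 k _ _ _ _ _ _ _ (by simp [Int.shiftRight_eq_div_pow]; omega)]
        refine ⟨rfl, by simp; omega, by ring⟩
      · simp only [ht, reduceDIte, ht', hb, reduceCtorEq, false_and, if_false,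
          ne_eq, not_false_iff, and_false]
        obtain ⟨ih1, ih2, ih3⟩ := ih (t >>> (1:Nat)) (n >>> (1:Nat)) (ix + 1) s
          (tn + (PySem.Int.mod t 2 <<< (ix - s).toNat))
          (nn + (PySem.Int.mod n 2 <<< (ix - s).toNat))
          (by simp [Int.shiftRight_eq_div_pow]; omega) (by omega)
        refine ⟨ih1, ?_, ?_⟩
        · rw [ih2]
          rcases (pvPhase2 (t >>> (1:Nat)) (n >>> (1:Nat))).1 with _ | e <;> simp
          ring
        · rw [ih3]
          have hp : ((ix + 1) - s).toNat = (ix - s).toNat + 1 := by omega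
          rw [hp, Int.shiftLeft_eq, Int.shiftLeft_eq]
          ring
    · rw [pvLoopA, pvPhase2]
      simp [ht, show t ≤ 0 by omega]

-- pvPhase2 agrees with B's pvDiffRun at a state whose low bits differ.
lemma pvPhase2_eq_diffRun (k : Nat) : ∀ (t n : Int), t.toNat ≤ k → 0 < t →
    PySem.Int.mod t 2 ≠ PySem.Int.mod n 2 → pvPhase2 t n = pvDiffRun t n := by
  induction k with
  | zero =>
    intro t n hk ht hb
    omega
  | succ k ih =>
    intro t n hk ht hb
    rw [pvPhase2, pvDiffRun]
    have ht' : ¬ t ≤ 0 := by omega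
    simp only [ht', reduceDIte, hb, if_false]
    by_cases h2 : t >>> (1:Nat) ≤ 0
    · rw [pvPhase2]
      simp [h2]
    · by_cases h3 : PySem.Int.mod (t >>> (1:Nat)) 2 = PySem.Int.mod (n >>> (1:Nat)) 2
      · rw [pvPhase2]
        simp only [h2, reduceDIte, if_pos h3]
        simp
      · rw [ih (t >>> (1:Nat)) (n >>> (1:Nat)) (by simp [Int.shiftRight_eq_div_pow]; omega) (by omega) h3]
        simp only [h2, reduceDIte, h3, if_false]
        rcases hr : (pvDiffRun (t >>> (1:Nat)) (n >>> (1:Nat))).1 with _ | e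
        all_goals simp_all [Option.map]

-- phase 1 (start still none): A's postprocessed loop equals B shifted by ix.
lemma pvLoopA_main (k : Nat) : ∀ (t n ix : Int), t.toNat ≤ k →
    (let r := pvLoopA t n ix none none 0 0
     match r.2.1 with
     | some s => (s, r.2.2.1, some (decide (r.2.2.2.1 - r.2.2.2.2 = 1)))
     | none => (r.1, (none : Option Int), (none : Option Bool)))
    = ((compare_bits_alt t n).1 + ix, ((compare_bits_alt t n).2.1).map (· + ix),
       (compare_bits_alt t n).2.2) := by
  induction k with
  | zero =>
    intro t n ix hk
    have ht : ¬ 0 < t := by omega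
    rw [pvLoopA, compare_bits_alt]
    simp [ht, show t ≤ 0 by omega]
  | succ k ih =>
    intro t n ix hk
    by_cases ht : 0 < t
    · rw [pvLoopA, compare_bits_alt]
      have ht' : ¬ t ≤ 0 := by omega
      by_cases hb : PySem.Int.mod t 2 = PySem.Int.mod n 2
      · simp only [ht, reduceDIte, ht', hb, and_false, if_false, ne_eq,
          not_true, and_true]
        have H := ih (t >>> (1:Nat)) (n >>> (1:Nat)) (ix + 1)
          (by simp [Int.shiftRight_eq_div_pow]; omega)
        simp only at H
        rw [H]
        refine Prod.ext (by simp; ring) (Prod.ext ?_ (by simp))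
        rcases (compare_bits_alt (t >>> (1:Nat)) (n >>> (1:Nat))).2.1 with _ | b <;> simp
        ring
      · simp only [ht, reduceDIte, ht', hb, if_false, ne_eq,
          not_false_iff, not_true, and_false, and_self, if_true]
        obtain ⟨h1, h2, h3⟩ := pvLoopA_phase2 k (t >>> (1:Nat)) (n >>> (1:Nat)) (ix + 1) ix
          (0 + (PySem.Int.mod t 2 <<< (ix - ix).toNat))
          (0 + (PySem.Int.mod n 2 <<< (ix - ix).toNat))
          (by simp [Int.shiftRight_eq_div_pow]; omega) (by omega)
        have hpd := pvPhase2_eq_diffRun (k + 1) t n hk ht hb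
        rw [← hpd, pvPhase2]
        simp only [ht', reduceDIte, if_neg hb]
        rw [h1]
        refine Prod.ext (by simp) (Prod.ext ?_ ?_)
        · dsimp only
          rw [h2]
          rcases (pvPhase2 (t >>> (1:Nat)) (n >>> (1:Nat))).1 with _ | e <;> simp
          ring
        · dsimp only
          rw [h3]
          have e0 : (ix - ix).toNat = 0 := by omega
          have e1 : ((ix + 1) - ix).toNat = 1 := by omega
          rw [e0, e1, Int.shiftLeft_eq, Int.shiftLeft_eq]
          congr 1
          simp only [decide_eq_decide]
          constructor <;> intro h <;> norm_num at * <;> omega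
    · rw [pvLoopA, compare_bits_alt]
      simp [ht, show t ≤ 0 by omega]

-- ===== VERDICT (by name: the statement is the Claim_ definition above) =====
theorem compare_bits_spec : Claim_equal_compare_bits := by
  intro target number _
  unfold Spec_compare_bits compare_bits
  have h := pvLoopA_main target.toNat target number 0 (le_refl _)
  simp only at h
  rw [h]
  rcases compare_bits_alt target number with ⟨a, b, c⟩
  simp
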